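-- pv_equiv track=rewrite | github.com/marcotownson/wow-backup | archive/phase3/wow_signal_semantic_analyser.py | chunk_bits
-- ===== SOURCE A (Python) =====
-- from typing import List, Dict, Tuple, Optional
--
-- def chunk_bits(bits: str, width: int, offset: int = 0, ignore_tail: bool = True) -> List[str]:
--     s = bits[offset:]
--     rem = len(s) % width
--     if rem and ignore_tail:
--         s = s[:len(s)-rem]
--     elif rem and not ignore_tail:
--         s = s + ('0' * (width - rem))
--     return [s[i:i+width] for i in range(0, len(s), width) if i+width <= len(s)]
-- ===== SOURCE B (Python) =====
-- from typing import List
--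
-- def chunk_bits(bits: str, width: int, offset: int = 0, ignore_tail: bool = True) -> List[str]:
--     out = []
--     buf = ''
--     for ch in bits[offset:]:
--         buf += ch
--         if len(buf) == width:
--             out.append(buf)
--             buf = ''
--     if buf and not ignore_tail:
--         buf += '0' * (width - len(buf))
--     if len(buf) == width:
--         out.append(buf)
--     return out
-- ===== Notes on version B (the rewrite author's own statement) =====
-- stated objective: alternative
-- what changed: A trims or zero-pads the string to a multiple of width and then slices it by index arithmetic over range(0,len,width); B never slices: it streams the string character by character into a buffer, flushing the buffer into the output each time it reaches width, and resolves the leftover buffer (drop or pad) once at the end.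
import Mathlib
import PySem

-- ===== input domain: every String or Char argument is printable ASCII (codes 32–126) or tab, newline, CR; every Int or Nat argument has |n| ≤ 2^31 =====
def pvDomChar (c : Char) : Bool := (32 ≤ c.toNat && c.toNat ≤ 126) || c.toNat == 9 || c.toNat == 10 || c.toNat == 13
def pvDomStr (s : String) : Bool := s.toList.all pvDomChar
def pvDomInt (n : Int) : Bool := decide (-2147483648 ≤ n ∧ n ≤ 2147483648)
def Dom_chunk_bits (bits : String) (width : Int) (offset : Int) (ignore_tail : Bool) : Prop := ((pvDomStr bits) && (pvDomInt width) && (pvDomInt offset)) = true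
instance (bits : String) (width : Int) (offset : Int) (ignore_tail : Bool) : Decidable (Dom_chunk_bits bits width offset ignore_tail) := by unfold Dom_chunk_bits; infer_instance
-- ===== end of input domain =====

-- B replaces A's global trim/pad-then-slice-by-index by a single character-by-character stream
-- into a buffer that is flushed at each full width; alternative decomposition, same cost.


-- ===== PORT A =====
def chunk_bits (bits : String) (width : Int) (offset : Int) (ignore_tail : Bool) : List String :=
  -- s = bits[offset:]
  let s := PySem.Chars.slice bits.toList (some offset) none
  -- rem = len(s) % width   (width = 0 raises ZeroDivisionError: excluded by Pre_)
  let rem := PySem.Int.mod (s.length : Int) width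
  -- if rem and ignore_tail: s = s[:len(s)-rem]  elif rem and not ignore_tail: s = s + '0'*(width-rem)
  let s' := if rem ≠ 0 ∧ ignore_tail = true then PySem.Chars.slice s none (some ((s.length : Int) - rem))
            else if rem ≠ 0 ∧ ignore_tail = false then s ++ List.replicate (width - rem).toNat '0'
            else s
  -- [s[i:i+width] for i in range(0, len(s), width) if i+width <= len(s)]
  ((PySem.List.pyRange 0 (s'.length : Int) width).filter
      (fun i => decide (i + width ≤ (s'.length : Int)))).map
    (fun i => String.ofList (PySem.Chars.slice s' (some i) (some (i + width))))

-- ===== PORT B =====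
def chunk_bits_alt (bits : String) (width : Int) (offset : Int) (ignore_tail : Bool) : List String :=
  -- out = []; buf = ''
  -- for ch in bits[offset:]: buf += ch; if len(buf) == width: out.append(buf); buf = ''
  let st := (PySem.Chars.slice bits.toList (some offset) none).foldl
    (fun (p : List String × List Char) ch =>
      let buf' := p.2 ++ [ch]
      if (buf'.length : Int) = width then (p.1 ++ [String.ofList buf'], []) else (p.1, buf')) ([], [])
  -- if buf and not ignore_tail: buf += '0' * (width - len(buf))
  let buf := if st.2 ≠ [] ∧ ignore_tail = false
             then st.2 ++ List.replicate (width - (st.2.length : Int)).toNat '0' else st.2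
  -- if len(buf) == width: out.append(buf)
  if (buf.length : Int) = width then st.1 ++ [String.ofList buf] else st.1

-- ===== PRECONDITION & SPEC =====
-- Pre_ excludes exactly width = 0, where Python A raises ZeroDivisionError.
def Pre_chunk_bits (bits : String) (width : Int) (offset : Int) (ignore_tail : Bool) : Prop := width ≠ 0
instance (bits : String) (width : Int) (offset : Int) (ignore_tail : Bool) : Decidable (Pre_chunk_bits bits width offset ignore_tail) := by unfold Pre_chunk_bits; infer_instance
def pvWitness_chunk_bits : String × Int × Int × Bool := ("1011011", 2, 1, true)

def Spec_chunk_bits (bits : String) (width : Int) (offset : Int) (ignore_tail : Bool) (out : List String) : Prop := out = chunk_bits_alt bits width offset ignore_tail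
instance (bits : String) (width : Int) (offset : Int) (ignore_tail : Bool) (out : List String) : Decidable (Spec_chunk_bits bits width offset ignore_tail out) := by unfold Spec_chunk_bits; infer_instance

-- ===== CLAIM (what is proved, stated in full; the proofs are below) =====
def Claim_equal_chunk_bits : Prop := ∀ (bits : String) (width : Int) (offset : Int) (ignore_tail : Bool), Dom_chunk_bits bits width offset ignore_tail → Pre_chunk_bits bits width offset ignore_tail → Spec_chunk_bits bits width offset ignore_tail (chunk_bits bits width offset ignore_tail)

-- ===== LEMMAS AND PROOFS =====

-- Common specification both ports are reduced to: chunk a char list into width-w pieces,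
-- skipping (it = true) or zero-padding (it = false) a short tail.
def cp (w : Nat) (it : Bool) (s : List Char) : List String :=
  if s = [] then []
  else if 0 < w ∧ w ≤ s.length then
    String.ofList (s.take w) :: cp w it (s.drop w)
  else if it then [] else [String.ofList (s ++ List.replicate (w - s.length) '0')]
termination_by s.length
decreasing_by simp only [List.length_drop]; omega

-- pyRange with a negative step, from 0 up to a nonnegative stop, is empty.
lemma pyRange_neg_nil {b step : Int} (hs : step < 0) (hb : 0 ≤ b) :
    PySem.List.pyRange 0 b step = [] := by
  unfold PySem.List.pyRange
  have h1 : ¬ step = 0 := by omega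
  have h2 : ¬ 0 < step := by omega
  have h3 : ¬ b < 0 := by omega
  simp [h1, h2, h3]

-- pyRange 0 n w as a map over List.range of the chunk count.
lemma pyRange_pos_eq (w n : Nat) (hw : 0 < w) :
    PySem.List.pyRange 0 (n : Int) (w : Int)
      = (List.range (if 0 < n then (n - 1) / w + 1 else 0)).map (fun k => ((w * k : Nat) : Int)) := by
  rw [PySem.List.pyRange_of_pos 0 (n : Int) (by exact_mod_cast hw)]
  have hcnt : (if (0 : Int) < (n : Int) then (((n : Int) - 0 + (w : Int) - 1) / (w : Int)).toNat else 0)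
      = (if 0 < n then (n - 1) / w + 1 else 0) := by
    by_cases hn : 0 < n
    · have h1 : ((n : Int) - 0 + (w : Int) - 1) = ((n - 1 + w : Nat) : Int) := by push_cast; omega
      rw [if_pos (by exact_mod_cast hn), if_pos hn, h1]
      rw [← Int.natCast_div]
      rw [Int.toNat_natCast]
      rw [Nat.add_div_right _ hw]
    · have hn0 : n = 0 := by omega
      subst hn0
      norm_num
  rw [hcnt]
  apply List.map_congr_left
  intro k _
  push_cast
  ring

-- A slice [i, i+w) with natural endpoints is take w ∘ drop i.
lemma slice_chunk (s : List Char) (i w : Nat) :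
    PySem.Chars.slice s (some (i : Int)) (some ((i : Int) + (w : Int))) = (s.drop i).take w := by
  rw [PySem.Chars.slice_eq_listSlice]
  have h : ((i : Int) + (w : Int)) = ((i + w : Nat) : Int) := by push_cast; ring
  rw [h, PySem.List.slice_natCast]
  congr 1
  omega

-- Peeling the first index off a width-w index range.
lemma peel (w : Nat) (f : Int → List String) (c : Nat) :
    ((List.range (c + 1)).map (fun k => ((w * k : Nat) : Int))).flatMap f
      = f ((0 : Nat) : Int)
        ++ ((List.range c).map (fun k => ((w * (k + 1) : Nat) : Int))).flatMap f := by
  rw [List.range_succ_eq_map]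
  simp [List.flatMap_map, Function.comp_def, Nat.succ_eq_add_one]

-- The chunk count of the tail after removing one full chunk.
lemma count_tail (w : Nat) (hw : 0 < w) (m : Nat) (hwl : w ≤ m) :
    (if 0 < m - w then (m - w - 1) / w + 1 else 0) = (m - 1) / w := by
  by_cases hlt : 0 < m - w
  · rw [if_pos hlt]
    have h1 : m - 1 = (m - w - 1) + w := by omega
    rw [h1, Nat.add_div_right _ hw]
  · rw [if_neg hlt]
    exact (Nat.div_eq_of_lt (by omega)).symm

-- cp of the empty string.
lemma cp_nil (w : Nat) (it : Bool) : cp w it [] = [] := by rw [cp]; simp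

-- A's comprehension over a string whose length is a multiple of w computes cp.
lemma flatMap_gA (w : Nat) (hw : 0 < w) (it : Bool) :
    ∀ (n : Nat) (s : List Char), s.length ≤ n → w ∣ s.length →
    (PySem.List.pyRange 0 (s.length : Int) (w : Int)).flatMap
        (fun i => [String.ofList (PySem.Chars.slice s (some i) (some (i + (w : Int))))])
      = cp w it s := by
  intro n
  induction n with
  | zero =>
    intro s hs _
    have h0 : s = [] := by
      cases s with
      | nil => rfl
      | cons a l => simp at hs
    subst h0
    rw [pyRange_pos_eq w [].length hw]
    simp [cp]
  | succ n ih =>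
    intro s hs hdvd
    rcases Nat.eq_zero_or_pos s.length with h0 | h0
    · have h0' : s = [] := List.eq_nil_of_length_eq_zero h0
      subst h0'
      rw [pyRange_pos_eq w [].length hw]
      simp [cp]
    · have hwl : w ≤ s.length := Nat.le_of_dvd h0 hdvd
      rw [pyRange_pos_eq w s.length hw, if_pos h0, peel]
      have hchunk0 : PySem.Chars.slice s (some ((0 : Nat) : Int)) (some (((0 : Nat) : Int) + (w : Int))) = s.take w := by
        rw [slice_chunk]; simp
      have hshift : ∀ k : Nat,
          PySem.Chars.slice s (some ((w * (k + 1) : Nat) : Int)) (some (((w * (k + 1) : Nat) : Int) + (w : Int)))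
            = PySem.Chars.slice (s.drop w) (some ((w * k : Nat) : Int)) (some (((w * k : Nat) : Int) + (w : Int))) := by
        intro k
        rw [slice_chunk, slice_chunk, List.drop_drop]
        have h : w + w * k = w * (k + 1) := by ring
        rw [h]
      have htail : ((List.range ((s.length - 1) / w)).map (fun k => ((w * (k + 1) : Nat) : Int))).flatMap
            (fun i => [String.ofList (PySem.Chars.slice s (some i) (some (i + (w : Int))))])
          = (PySem.List.pyRange 0 ((s.drop w).length : Int) (w : Int)).flatMap
            (fun i => [String.ofList (PySem.Chars.slice (s.drop w) (some i) (some (i + (w : Int))))]) := by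
        rw [pyRange_pos_eq w (s.drop w).length hw]
        simp only [List.flatMap_map, hshift]
        simp only [List.length_drop]
        rw [count_tail w hw s.length hwl]
      rw [hchunk0, htail, ih (s.drop w) (by simp only [List.length_drop]; omega)
            (by simpa using Nat.dvd_sub hdvd (dvd_refl w))]
      have hnil : ¬ (s = []) := by intro h; subst h; simp at h0
      conv_rhs => rw [cp]
      rw [if_neg hnil, if_pos ⟨hw, hwl⟩]
      rfl

-- On a string whose length is a multiple of w, A's filter keeps every index.
lemma filter_id (w : Nat) (hw : 0 < w) (t : List Char) (hdvd : w ∣ t.length) :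
    (PySem.List.pyRange 0 (t.length : Int) (w : Int)).filter
        (fun i => decide (i + (w : Int) ≤ (t.length : Int))) = PySem.List.pyRange 0 (t.length : Int) (w : Int) := by
  rw [List.filter_eq_self]
  intro i hi
  rw [PySem.List.mem_pyRange_iff_of_pos (by exact_mod_cast hw)] at hi
  obtain ⟨hi0, hilt, j, hj⟩ := hi
  simp only [sub_zero] at hj
  obtain ⟨m, hm⟩ := hdvd
  simp only [decide_eq_true_eq]
  have hjm : j < m := by
    by_contra hc
    have hc : m ≤ j := by omega
    have : (w : Int) * (m : Int) ≤ (w : Int) * j := by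
      apply mul_le_mul_of_nonneg_left _ (by exact_mod_cast Nat.le_of_lt hw)
      exact_mod_cast hc
    rw [← hj] at this
    omega
  have : (w : Int) * (j + 1) ≤ (w : Int) * (m : Int) := by
    apply mul_le_mul_of_nonneg_left _ (by exact_mod_cast Nat.le_of_lt hw)
    omega
  have hm' : (t.length : Int) = (w : Int) * (m : Int) := by exact_mod_cast hm
  have hexp : (w : Int) * (j + 1) = (w : Int) * j + w := by ring
  omega

-- A's whole chunking expression, on a multiple-of-w string.
lemma a_expr_eq (w : Nat) (hw : 0 < w) (it : Bool) (t : List Char) (hdvd : w ∣ t.length) :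
    ((PySem.List.pyRange 0 (t.length : Int) (w : Int)).filter
        (fun i => decide (i + (w : Int) ≤ (t.length : Int)))).map
      (fun i => String.ofList (PySem.Chars.slice t (some i) (some (i + (w : Int))))) = cp w it t := by
  rw [filter_id w hw t hdvd, List.map_eq_flatMap]
  exact flatMap_gA w hw it t.length t (le_refl _) hdvd

-- Trimming the tail before exact chunking equals skipping it on the fly.
lemma cp_trim (w : Nat) (hw : 0 < w) :
    ∀ (n : Nat) (s : List Char), s.length ≤ n →
    cp w true (s.take (s.length - s.length % w)) = cp w true s := by
  intro n
  induction n with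
  | zero =>
    intro s hs
    have h0 : s = [] := by
      cases s with
      | nil => rfl
      | cons a l => simp at hs
    subst h0
    simp
  | succ n ih =>
    intro s hs
    by_cases hwl : w ≤ s.length
    · have hrem : s.length % w < w := Nat.mod_lt _ hw
      have hdvd : w ∣ s.length - s.length % w := by
        have := Nat.div_add_mod s.length w
        exact ⟨s.length / w, by omega⟩
      have hge : w ≤ s.length - s.length % w := by
        apply Nat.le_of_dvd (by omega) hdvd
      have hlen : (s.take (s.length - s.length % w)).length = s.length - s.length % w := by
        rw [List.length_take]; omega
      conv_lhs => rw [cp]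
      rw [if_neg (List.ne_nil_of_length_pos (by rw [hlen]; omega)),
          if_pos ⟨hw, by omega⟩]
      have hhead : (s.take (s.length - s.length % w)).take w = s.take w := by
        rw [List.take_take]
        congr 1
        omega
      have hmodtail : (s.length - w) % w = s.length % w := by
        conv_rhs => rw [(by omega : s.length = (s.length - w) + w)]
        rw [Nat.add_mod_right]
      have htail : (s.take (s.length - s.length % w)).drop w
          = (s.drop w).take ((s.drop w).length - (s.drop w).length % w) := by
        rw [List.drop_take]
        congr 1
        simp only [List.length_drop]
        rw [hmodtail]
        omega
      rw [hhead, htail, ih (s.drop w) (by simp only [List.length_drop]; omega)]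
      conv_rhs => rw [cp]
      rw [if_neg (by intro h; subst h; simp at hwl; omega), if_pos ⟨hw, hwl⟩]
    · have hrem : s.length % w = s.length := Nat.mod_eq_of_lt (by omega)
      rw [hrem]
      simp only [Nat.sub_self, List.take_zero, cp_nil]
      by_cases hnil : s = []
      · subst hnil; rw [cp_nil]
      · conv_rhs => rw [cp]
        rw [if_neg hnil, if_neg (by rintro ⟨-, h2⟩; omega)]
        simp

-- Padding the tail before exact chunking equals padding it on the fly.
lemma cp_pad (w : Nat) (hw : 0 < w) :
    ∀ (n : Nat) (s : List Char), s.length ≤ n → s.length % w ≠ 0 →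
    cp w false (s ++ List.replicate (w - s.length % w) '0') = cp w false s := by
  intro n
  induction n with
  | zero =>
    intro s hs hrem
    have h0 : s = [] := by
      cases s with
      | nil => rfl
      | cons a l => simp at hs
    subst h0
    simp at hrem
  | succ n ih =>
    intro s hs hrem
    by_cases hwl : w ≤ s.length
    · have hmodtail : (s.length - w) % w = s.length % w := by
        conv_rhs => rw [(by omega : s.length = (s.length - w) + w)]
        rw [Nat.add_mod_right]
      have hlen : (s ++ List.replicate (w - s.length % w) '0').length = s.length + (w - s.length % w) := by
        simp
      conv_lhs => rw [cp]
      rw [if_neg (List.ne_nil_of_length_pos (by rw [hlen]; omega)),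
          if_pos ⟨hw, by rw [hlen]; omega⟩]
      rw [List.take_append_of_le_length hwl, List.drop_append_of_le_length hwl]
      have htail : (s.drop w) ++ List.replicate (w - (s.drop w).length % w) '0'
          = (s.drop w) ++ List.replicate (w - s.length % w) '0' := by
        simp only [List.length_drop, hmodtail]
      rw [← htail, ih (s.drop w) (by simp only [List.length_drop]; omega)
            (by simp only [List.length_drop]; rw [hmodtail]; exact hrem)]
      conv_rhs => rw [cp]
      rw [if_neg (by intro h; subst h; simp at hwl; omega), if_pos ⟨hw, hwl⟩]
    · have hrem' : s.length % w = s.length := Nat.mod_eq_of_lt (by omega)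
      have h0 : 0 < s.length := by
        rcases Nat.eq_zero_or_pos s.length with h | h
        · exfalso; rw [h] at hrem; simp at hrem
        · exact h
      have hlen : (s ++ List.replicate (w - s.length % w) '0').length = w := by
        rw [List.length_append, List.length_replicate, hrem']; omega
      conv_lhs => rw [cp]
      rw [if_neg (List.ne_nil_of_length_pos (by rw [hlen]; omega)),
          if_pos ⟨hw, by omega⟩]
      have htake : (s ++ List.replicate (w - s.length % w) '0').take w = s ++ List.replicate (w - s.length % w) '0' :=
        List.take_of_length_le (by omega)
      have hdrop : (s ++ List.replicate (w - s.length % w) '0').drop w = [] :=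
        List.drop_eq_nil_of_le (by omega)
      rw [htake, hdrop, cp_nil]
      have hnil : ¬ (s = []) := by intro h; subst h; simp at h0
      conv_rhs => rw [cp]
      rw [if_neg hnil, if_neg (by rintro ⟨-, h2⟩; omega)]
      rw [hrem']
      simp

-- Port A computes cp for a positive width.
lemma a_eq_cp (w : Nat) (hw : 0 < w) (bits : String) (offset : Int) (it : Bool) :
    chunk_bits bits ((w : Nat) : Int) offset it
      = cp w it (PySem.Chars.slice bits.toList (some offset) none) := by
  unfold chunk_bits
  set s := PySem.Chars.slice bits.toList (some offset) none with hsdef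
  simp only [PySem.Int.mod_natCast]
  by_cases hr : s.length % w = 0
  · simp only [hr, Nat.cast_zero, ne_eq, not_true_eq_false, false_and, if_false]
    exact a_expr_eq w hw it s (Nat.dvd_of_mod_eq_zero hr)
  · have hrne : ((s.length % w : Nat) : Int) ≠ 0 := by exact_mod_cast hr
    cases it with
    | true =>
      rw [if_pos ⟨hrne, rfl⟩]
      have hsl : PySem.Chars.slice s none (some ((s.length : Int) - ((s.length % w : Nat) : Int)))
          = s.take (s.length - s.length % w) := by
        rw [PySem.Chars.slice_eq_listSlice]
        have h1 : (s.length : Int) - ((s.length % w : Nat) : Int) = ((s.length - s.length % w : Nat) : Int) := by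
          have := Nat.mod_le s.length w
          push_cast
          omega
        rw [h1, PySem.List.slice_to s (Int.natCast_nonneg _), Int.toNat_natCast]
      rw [hsl]
      have hdvd : w ∣ (s.take (s.length - s.length % w)).length := by
        have hle : s.length - s.length % w ≤ s.length := by omega
        have : (s.take (s.length - s.length % w)).length = s.length - s.length % w := by
          rw [List.length_take]; omega
        rw [this]
        have := Nat.div_add_mod s.length w
        exact ⟨s.length / w, by omega⟩
      rw [a_expr_eq w hw true _ hdvd]
      exact cp_trim w hw s.length s (le_refl _)
    | false =>
      rw [if_neg (by simp), if_pos ⟨hrne, rfl⟩]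
      have hpadn : (((w : Nat) : Int) - ((s.length % w : Nat) : Int)).toNat = w - s.length % w := by
        have : s.length % w < w := Nat.mod_lt _ hw
        omega
      rw [hpadn]
      have hdvd : w ∣ (s ++ List.replicate (w - s.length % w) '0').length := by
        have hrlt : s.length % w < w := Nat.mod_lt _ hw
        have := Nat.div_add_mod s.length w
        simp only [List.length_append, List.length_replicate]
        exact ⟨s.length / w + 1, by rw [Nat.mul_add, Nat.mul_one]; omega⟩
      rw [a_expr_eq w hw false _ hdvd]
      exact cp_pad w hw s.length s (le_refl _) hr

-- The short tail left over after removing all full width-w chunks.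
def remTail (w : Nat) (s : List Char) : List Char :=
  if 0 < w ∧ w ≤ s.length then remTail w (s.drop w) else s
termination_by s.length
decreasing_by simp only [List.length_drop]; omega

lemma remTail_lt (w : Nat) (hw : 0 < w) : ∀ (n : Nat) (s : List Char), s.length ≤ n → (remTail w s).length < w := by
  intro n
  induction n with
  | zero =>
    intro s hs
    have h0 : s = [] := List.eq_nil_of_length_eq_zero (by omega)
    subst h0
    rw [remTail, if_neg (by rintro ⟨-, h2⟩; simp only [List.length_nil] at h2; omega)]
    simpa using hw
  | succ n ih =>
    intro s hs
    by_cases h : w ≤ s.length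
    · rw [remTail, if_pos ⟨hw, h⟩]
      exact ih (s.drop w) (by simp only [List.length_drop]; omega)
    · rw [remTail, if_neg (by rintro ⟨-, h2⟩; omega)]
      omega

-- B's loop body, named for the invariant.
def stepB (width : Int) (p : List String × List Char) (ch : Char) : List String × List Char :=
  let buf' := p.2 ++ [ch]
  if (buf'.length : Int) = width then (p.1 ++ [String.ofList buf'], []) else (p.1, buf')

-- Invariant of B's streaming loop for a positive width.
lemma fold_inv (w : Nat) (hw : 0 < w) :
    ∀ (s : List Char) (out : List String) (buf : List Char), buf.length < w →
    s.foldl (stepB ((w : Nat) : Int)) (out, buf)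
      = (out ++ cp w true (buf ++ s), remTail w (buf ++ s)) := by
  intro s
  induction s with
  | nil =>
    intro out buf hbuf
    have h1 : cp w true buf = [] := by
      by_cases hnil : buf = []
      · subst hnil; exact cp_nil w true
      · rw [cp, if_neg hnil, if_neg (by rintro ⟨-, h2⟩; omega)]; simp
    have h2 : remTail w buf = buf := by
      rw [remTail, if_neg (by rintro ⟨-, h2⟩; omega)]
    simp only [List.foldl_nil, List.append_nil, h1, h2]
  | cons ch rest ih =>
    intro out buf hbuf
    simp only [List.foldl_cons]
    have hassoc : buf ++ ch :: rest = (buf ++ [ch]) ++ rest := by simp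
    by_cases hfull : ((buf ++ [ch]).length : Int) = ((w : Nat) : Int)
    · have hfull' : (buf ++ [ch]).length = w := by exact_mod_cast hfull
      have hstep : stepB ((w : Nat) : Int) (out, buf) ch = (out ++ [String.ofList (buf ++ [ch])], []) := by
        unfold stepB
        simp only [hfull, if_pos]
      rw [hstep, ih (out ++ [String.ofList (buf ++ [ch])]) [] (by simpa using hw)]
      have hcp : cp w true (buf ++ ch :: rest) = String.ofList (buf ++ [ch]) :: cp w true rest := by
        rw [hassoc, cp,
            if_neg (List.ne_nil_of_length_pos (by rw [List.length_append, hfull']; omega)),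
            if_pos ⟨hw, by rw [List.length_append, hfull']; omega⟩,
            List.take_append_of_le_length (by omega), List.drop_append_of_le_length (by omega),
            List.take_of_length_le (by omega), List.drop_eq_nil_of_le (by omega)]
        simp
      have hrem : remTail w (buf ++ ch :: rest) = remTail w rest := by
        rw [hassoc, remTail, if_pos ⟨hw, by rw [List.length_append, hfull']; omega⟩,
            List.drop_append_of_le_length (by omega), List.drop_eq_nil_of_le (by omega)]
        simp
      rw [hcp, hrem]
      simp
    · have hlt : (buf ++ [ch]).length < w := by
        have h1 : (buf ++ [ch]).length = buf.length + 1 := by simp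
        have hne : (buf ++ [ch]).length ≠ w := by
          intro h; exact hfull (by exact_mod_cast h)
        omega
      have hstep : stepB ((w : Nat) : Int) (out, buf) ch = (out, buf ++ [ch]) := by
        unfold stepB
        simp only [if_neg hfull]
      rw [hstep, ih out (buf ++ [ch]) hlt, hassoc]

-- Padding behaviour of cp as a function of the streamed remainder.
lemma cp_false_eq (w : Nat) (hw : 0 < w) :
    ∀ (n : Nat) (s : List Char), s.length ≤ n →
    cp w false s = cp w true s
      ++ (if remTail w s = [] then []
          else [String.ofList (remTail w s ++ List.replicate (w - (remTail w s).length) '0')]) := by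
  intro n
  induction n with
  | zero =>
    intro s hs
    have h0 : s = [] := List.eq_nil_of_length_eq_zero (by omega)
    subst h0
    have hcond : ¬ (0 < w ∧ w ≤ ([] : List Char).length) := by
      rintro ⟨-, h2⟩; simp only [List.length_nil] at h2; omega
    rw [cp_nil, cp_nil, remTail, if_neg hcond]
    simp
  | succ n ih =>
    intro s hs
    by_cases hnil : s = []
    · subst hnil
      have hcond : ¬ (0 < w ∧ w ≤ ([] : List Char).length) := by
        rintro ⟨-, h2⟩; simp only [List.length_nil] at h2; omega
      rw [cp_nil, cp_nil, remTail, if_neg hcond]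
      simp
    · by_cases hwl : w ≤ s.length
      · have hremS : remTail w s = remTail w (s.drop w) := by
          conv_lhs => rw [remTail]
          rw [if_pos ⟨hw, hwl⟩]
        have hcpf : cp w false s = String.ofList (s.take w) :: cp w false (s.drop w) := by
          rw [cp, if_neg hnil, if_pos ⟨hw, hwl⟩]
        have hcpt : cp w true s = String.ofList (s.take w) :: cp w true (s.drop w) := by
          rw [cp, if_neg hnil, if_pos ⟨hw, hwl⟩]
        rw [hcpf, hcpt, hremS, ih (s.drop w) (by simp only [List.length_drop]; omega)]
        simp
      · have hremS : remTail w s = s := by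
          rw [remTail, if_neg (by rintro ⟨-, h2⟩; omega)]
        have hcpf : cp w false s = [String.ofList (s ++ List.replicate (w - s.length) '0')] := by
          rw [cp, if_neg hnil, if_neg (by rintro ⟨-, h2⟩; omega)]
          simp
        have hcpt : cp w true s = [] := by
          rw [cp, if_neg hnil, if_neg (by rintro ⟨-, h2⟩; omega)]
          simp
        rw [hcpf, hcpt, hremS, if_neg hnil]
        simp

-- Port B computes cp for a positive width.
lemma b_eq_cp (w : Nat) (hw : 0 < w) (bits : String) (offset : Int) (it : Bool) :
    chunk_bits_alt bits ((w : Nat) : Int) offset it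
      = cp w it (PySem.Chars.slice bits.toList (some offset) none) := by
  unfold chunk_bits_alt
  set s := PySem.Chars.slice bits.toList (some offset) none with hsdef
  have hfold : s.foldl
      (fun (p : List String × List Char) ch =>
        let buf' := p.2 ++ [ch]
        if (buf'.length : Int) = ((w : Nat) : Int) then (p.1 ++ [String.ofList buf'], []) else (p.1, buf')) ([], [])
      = (cp w true s, remTail w s) := by
    have := fold_inv w hw s [] [] (by simpa using hw)
    simp only [List.nil_append] at this
    exact this
  rw [hfold]
  dsimp only
  have hrlt : (remTail w s).length < w := remTail_lt w hw s.length s (le_refl _)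
  cases it with
  | true =>
    rw [if_neg (show ¬ (remTail w s ≠ [] ∧ true = false) by simp),
        if_neg (show ¬ (((remTail w s).length : Int) = ((w : Nat) : Int)) by
          exact_mod_cast (show ¬ ((remTail w s).length = w) by omega))]
  | false =>
    by_cases hre : remTail w s = []
    · rw [if_neg (show ¬ (remTail w s ≠ [] ∧ false = false) by simp [hre]), hre,
          if_neg (show ¬ ((([] : List Char).length : Int) = ((w : Nat) : Int)) by
            exact_mod_cast (show ¬ (([] : List Char).length = w) by simp; omega))]
      rw [cp_false_eq w hw s.length s (le_refl _), hre]
      simp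
    · rw [if_pos (show remTail w s ≠ [] ∧ false = false from ⟨hre, rfl⟩)]
      have hpadn : (((w : Nat) : Int) - ((remTail w s).length : Int)).toNat = w - (remTail w s).length := by omega
      rw [hpadn]
      have hlen : (((remTail w s ++ List.replicate (w - (remTail w s).length) '0').length : Nat) : Int) = ((w : Nat) : Int) := by
        simp only [List.length_append, List.length_replicate]
        push_cast
        omega
      rw [if_pos hlen]
      rw [cp_false_eq w hw s.length s (le_refl _), if_neg hre]

-- Both ports return [] for a negative width.
lemma a_neg (bits : String) (width offset : Int) (it : Bool) (hneg : width < 0) :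
    chunk_bits bits width offset it = [] := by
  unfold chunk_bits
  dsimp only
  rw [pyRange_neg_nil hneg (by positivity)]
  simp

lemma b_neg (bits : String) (width offset : Int) (it : Bool) (hneg : width < 0) :
    chunk_bits_alt bits width offset it = [] := by
  unfold chunk_bits_alt
  set s := PySem.Chars.slice bits.toList (some offset) none with hsdef
  have hnolen : ∀ (t : List Char), ¬ ((t.length : Int) = width) := by
    intro t h
    have : (0 : Int) ≤ (t.length : Int) := by positivity
    omega
  have hfold : ∀ (t : List Char) (out : List String) (buf : List Char),
      t.foldl (fun (p : List String × List Char) ch =>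
        let buf' := p.2 ++ [ch]
        if (buf'.length : Int) = width then (p.1 ++ [String.ofList buf'], []) else (p.1, buf')) (out, buf)
      = (out, buf ++ t) := by
    intro t
    induction t with
    | nil => intro out buf; simp
    | cons ch rest ih =>
      intro out buf
      simp only [List.foldl_cons]
      rw [if_neg (hnolen (buf ++ [ch])), ih out (buf ++ [ch])]
      simp
  rw [hfold s [] []]
  simp only [List.nil_append]
  split_ifs with h1 h2 h2
  · exact absurd h2 (hnolen _)
  · rfl
  · exact absurd h2 (hnolen _)
  · rfl

-- ===== VERDICT (by name: the statement is the Claim_ definition above) =====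
theorem chunk_bits_spec : Claim_equal_chunk_bits := by
  intro bits width offset it _ hpre
  unfold Spec_chunk_bits
  rcases lt_trichotomy width 0 with hneg | h0 | hpos
  · rw [a_neg bits width offset it hneg, b_neg bits width offset it hneg]
  · exact absurd h0 hpre
  · have hwid : width = ((width.toNat : Nat) : Int) := (Int.toNat_of_nonneg (le_of_lt hpos)).symm
    rw [hwid, a_eq_cp width.toNat (by omega) bits offset it, b_eq_cp width.toNat (by omega) bits offset it]
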